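-- pv_equiv track=rewrite | github.com/Leroy2710/buhexpert | хакатон.py | merge_multiline_comments
-- ===== SOURCE A (Python) =====
-- def merge_multiline_comments(comments):
--     merged_comments = []
--     current_comment = None
--     for comment in comments:
--         if comment[0] is not None:  # Если у комментария есть id
--             if current_comment:
--                 merged_comments.append(current_comment)
--             current_comment = comment
--         else:
--             current_comment = (current_comment[0], current_comment[1], current_comment[2], current_comment[3] + ' ' + comment[3])
--     if current_comment:
--         merged_comments.append(current_comment)
--     return merged_comments
-- ===== SOURCE B (Python) =====
-- def merge_multiline_comments(comments):
--     # Group-at-a-time scan: peel off each parent's run of continuations, join its texts once per group.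
--     out = []
--     rest = comments
--     while rest:
--         head, tail = rest[0], rest[1:]
--         cont = []
--         for c in tail:
--             if c[0] is not None:
--                 break
--             cont.append(c)
--         out.append((head[0], head[1], head[2], ' '.join([head[3]] + [c[3] for c in cont])))
--         rest = tail[len(cont):]
--     return out
-- ===== Notes on version B (the rewrite author's own statement) =====
-- stated objective: alternative
-- what changed: Replaces A's element-wise fold that rebuilds a running current-comment tuple on every continuation with a group-at-a-time scan: each iteration peels one parent plus its whole run of continuations off the front and joins that group's texts once.
-- crash fix: On inputs whose first comment is a continuation (first field None) A raises TypeError (subscripting None); B returns that run as its own group with first field None. — e.g. on merge_multiline_comments([(none, "a", "b", "t")]): A raises TypeError, B returns [(none, "a", "b", "t")]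
import Mathlib
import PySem

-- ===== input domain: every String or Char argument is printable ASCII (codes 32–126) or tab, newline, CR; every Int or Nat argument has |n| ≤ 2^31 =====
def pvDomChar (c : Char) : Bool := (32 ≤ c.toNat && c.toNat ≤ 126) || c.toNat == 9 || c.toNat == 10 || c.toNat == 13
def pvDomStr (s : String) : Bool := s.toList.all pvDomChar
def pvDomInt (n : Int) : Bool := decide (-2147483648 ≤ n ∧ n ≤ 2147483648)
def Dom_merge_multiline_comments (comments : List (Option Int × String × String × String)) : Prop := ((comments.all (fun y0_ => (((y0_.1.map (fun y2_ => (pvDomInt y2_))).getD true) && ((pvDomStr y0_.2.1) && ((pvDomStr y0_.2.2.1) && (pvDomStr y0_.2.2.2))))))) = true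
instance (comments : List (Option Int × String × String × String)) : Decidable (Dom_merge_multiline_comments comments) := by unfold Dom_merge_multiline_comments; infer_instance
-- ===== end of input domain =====

-- B replaces A's element-wise fold with a group-at-a-time scan (peel one parent and its run of
-- continuations, join once per group); equivalence is proved on inputs whose first comment is not
-- a continuation (A raises TypeError there, B returns that run as its own group).

-- ===== PORT A =====
-- one loop step of A: state = (merged_comments, current_comment)
def mergeA_step (st : List (Option Int × String × String × String) × Option (Option Int × String × String × String))
    (c : Option Int × String × String × String) :
    List (Option Int × String × String × String) × Option (Option Int × String × String × String) :=
  if c.1.isSome then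
    -- a 4-tuple is always truthy, so 'if current_comment:' tests current ≠ None
    (match st.2 with
     | some cur => st.1 ++ [cur]
     | none => st.1, some c)
  else
    match st.2 with
    | some cur => (st.1, some (cur.1, cur.2.1, cur.2.2.1, cur.2.2.2 ++ " " ++ c.2.2.2))
    | none => (st.1, none)  -- Python raises TypeError here; excluded by Pre_

def merge_multiline_comments (comments : List (Option Int × String × String × String)) : List (Option Int × String × String × String) :=
  let st := comments.foldl mergeA_step ([], none)
  match st.2 with
  | some cur => st.1 ++ [cur]
  | none => st.1

-- ===== PORT B =====
-- exact hand port of Python's ' '.join(parts) for a nonempty list of strings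
def joinSpace : List String → String
  | [] => ""
  | x :: xs => xs.foldl (fun a t => a ++ " " ++ t) x

-- B's inner for-loop with break: the leading run of continuation comments
def contOf : List (Option Int × String × String × String) → List (Option Int × String × String × String)
  | [] => []
  | c :: tl => if c.1.isSome then [] else c :: contOf tl

-- B's outer while-loop: state = (rest, out); each iteration peels one whole group.
-- The Nat fuel is only a structural totality guard: each iteration consumes ≥ 1 element,
-- so fuel = initial length is always enough.
def altLoop : Nat → List (Option Int × String × String × String) → List (Option Int × String × String × String) → List (Option Int × String × String × String)
  | 0, _, out => out
  | _ + 1, [], out => out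
  | n + 1, head :: tail, out =>
    let cont := contOf tail
    altLoop n (tail.drop cont.length)
      (out ++ [(head.1, head.2.1, head.2.2.1, joinSpace (head.2.2.2 :: cont.map (fun c => c.2.2.2)))])

def merge_multiline_comments_alt (comments : List (Option Int × String × String × String)) : List (Option Int × String × String × String) :=
  altLoop comments.length comments []

-- ===== PRECONDITION & SPEC =====
-- Pre_ excludes exactly the inputs whose first comment is a continuation (fst = none): A raises
-- TypeError there (it subscripts current_comment = None).
def Pre_merge_multiline_comments (comments : List (Option Int × String × String × String)) : Prop :=
  (comments.head?.all (fun c => c.1.isSome)) = true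
instance (comments : List (Option Int × String × String × String)) : Decidable (Pre_merge_multiline_comments comments) := by unfold Pre_merge_multiline_comments; infer_instance

def pvWitness_merge_multiline_comments : (List (Option Int × String × String × String)) :=
  [(some 1, "a", "u", "t1"), (none, "", "", "t2"), (some 2, "b", "v", "t3")]

-- On inputs whose first comment is a continuation (first field None) A raises TypeError; B returns
-- that run as its own group with first field None.
def Raises_merge_multiline_comments (comments : List (Option Int × String × String × String)) : Prop :=
  (comments.head?.any (fun c => c.1.isNone)) = true
instance (comments : List (Option Int × String × String × String)) : Decidable (Raises_merge_multiline_comments comments) := by unfold Raises_merge_multiline_comments; infer_instance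

def pvRaiseWitness_merge_multiline_comments : (List (Option Int × String × String × String)) :=
  [(none, "a", "b", "t")]
def pvRaiseWitnessOut_merge_multiline_comments : List (Option Int × String × String × String) :=
  [(none, "a", "b", "t")]

def Spec_merge_multiline_comments (comments : List (Option Int × String × String × String)) (out : List (Option Int × String × String × String)) : Prop := out = merge_multiline_comments_alt comments
instance (comments : List (Option Int × String × String × String)) (out : List (Option Int × String × String × String)) : Decidable (Spec_merge_multiline_comments comments out) := by unfold Spec_merge_multiline_comments; infer_instance

-- ===== CLAIM (what is proved, stated in full; the proofs are below) =====
def Claim_equal_merge_multiline_comments : Prop := ∀ (comments : List (Option Int × String × String × String)), Dom_merge_multiline_comments comments → Pre_merge_multiline_comments comments → Spec_merge_multiline_comments comments (merge_multiline_comments comments)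

def Claim_raises_merge_multiline_comments : Prop := (∀ (comments : List (Option Int × String × String × String)), Dom_merge_multiline_comments comments → Raises_merge_multiline_comments comments → ¬ Pre_merge_multiline_comments comments) ∧ (Dom_merge_multiline_comments (pvRaiseWitness_merge_multiline_comments) ∧ Raises_merge_multiline_comments (pvRaiseWitness_merge_multiline_comments) ∧ merge_multiline_comments_alt (pvRaiseWitness_merge_multiline_comments) = pvRaiseWitnessOut_merge_multiline_comments)

-- ===== LEMMAS AND PROOFS =====

-- B's loop run to completion (fuel = exactly the remaining length)
def gAlt (rest : List (Option Int × String × String × String)) : List (Option Int × String × String × String) :=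
  altLoop rest.length rest []

-- altLoop only ever appends to its accumulator
theorem altLoop_out : ∀ (n : Nat) (rest out : List (Option Int × String × String × String)),
    altLoop n rest out = out ++ altLoop n rest [] := by
  intro n
  induction n with
  | zero => intro rest out; simp [altLoop]
  | succ n ih =>
    intro rest out
    cases rest with
    | nil => simp [altLoop]
    | cons head tail =>
      simp only [altLoop]
      rw [ih _ (out ++ _), ih _ ([] ++ _)]
      simp

-- any sufficient fuel computes the same result
theorem altLoop_fuel : ∀ (n m : Nat) (rest out : List (Option Int × String × String × String)),
    rest.length ≤ n → rest.length ≤ m → altLoop n rest out = altLoop m rest out := by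
  intro n
  induction n with
  | zero =>
    intro m rest out hn _
    have : rest = [] := by cases rest <;> simp_all
    subst this; cases m <;> simp [altLoop]
  | succ n ih =>
    intro m rest out hn hm
    cases rest with
    | nil => cases m <;> simp [altLoop]
    | cons head tail =>
      cases m with
      | zero => simp at hm
      | succ m =>
        simp only [altLoop]
        have hd : (tail.drop (contOf tail).length).length ≤ n := by
          simp at hn ⊢; omega
        have hd' : (tail.drop (contOf tail).length).length ≤ m := by
          simp at hm ⊢; omega
        exact ih m _ _ hd hd'

theorem joinSpace_merge (x y : String) (ys : List String) :
    joinSpace (x :: y :: ys) = joinSpace ((x ++ " " ++ y) :: ys) := by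
  simp [joinSpace]

-- one full step of B's loop, expressed through gAlt
theorem gAlt_cons (head : Option Int × String × String × String)
    (tail : List (Option Int × String × String × String)) :
    gAlt (head :: tail) =
      (head.1, head.2.1, head.2.2.1, joinSpace (head.2.2.2 :: (contOf tail).map (fun c => c.2.2.2)))
        :: gAlt (tail.drop (contOf tail).length) := by
  unfold gAlt
  simp only [List.length_cons, altLoop]
  rw [altLoop_out]
  rw [altLoop_fuel tail.length (tail.drop (contOf tail).length).length (tail.drop (contOf tail).length) []
    (by simp) (by simp)]
  simp

-- main invariant: from state (acc, some p), finishing A's fold over rest yields acc, then the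
-- group p heads (absorbing rest's leading continuations), then B's loop on the remainder.
theorem loop_inv : ∀ (rest : List (Option Int × String × String × String))
    (acc : List (Option Int × String × String × String)) (p : Option Int × String × String × String),
    (let st := rest.foldl mergeA_step (acc, some p);
     match st.2 with
     | some cur => st.1 ++ [cur]
     | none => st.1) =
    acc ++ (p.1, p.2.1, p.2.2.1, joinSpace (p.2.2.2 :: (contOf rest).map (fun c => c.2.2.2)))
      :: gAlt (rest.drop (contOf rest).length) := by
  intro rest
  induction rest with
  | nil => intro acc p; simp [contOf, joinSpace, gAlt, altLoop]
  | cons c tl ih =>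
    intro acc p
    by_cases h : c.1.isSome
    · have := ih (acc ++ [p]) c
      simp only [List.foldl_cons, mergeA_step, h, if_pos] at this ⊢
      rw [this]
      simp only [contOf, h, if_pos, List.map_nil, List.length_nil, List.drop_zero, joinSpace,
        List.foldl_nil]
      rw [gAlt_cons]
      simp [joinSpace]
    · have := ih acc (p.1, p.2.1, p.2.2.1, p.2.2.2 ++ " " ++ c.2.2.2)
      simp only [List.foldl_cons, mergeA_step, h, Bool.false_eq_true, if_false] at this ⊢
      rw [this]
      simp only [contOf, h, Bool.false_eq_true, if_false, List.map_cons, List.length_cons,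
        List.drop_succ_cons]
      rw [joinSpace_merge]

-- ===== VERDICT (by name: the statement is the Claim_ definition above) =====
theorem merge_multiline_comments_spec : Claim_equal_merge_multiline_comments := by
  intro comments _ hpre
  unfold Spec_merge_multiline_comments merge_multiline_comments merge_multiline_comments_alt
  match comments with
  | [] => simp [altLoop]
  | c :: rest =>
    have hc : c.1.isSome := by simpa [Pre_merge_multiline_comments] using hpre
    have := loop_inv rest [] c
    simp only [List.nil_append] at this
    simp only [List.foldl_cons, mergeA_step, hc, if_pos]
    rw [this]
    exact (gAlt_cons c rest).symm

@[simp] theorem merge_multiline_comments_raises : Claim_raises_merge_multiline_comments := by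
  unfold Claim_raises_merge_multiline_comments
  constructor
  · intro comments _ hr hp
    cases comments with
    | nil => simp [Raises_merge_multiline_comments] at hr
    | cons c tl =>
      simp [Raises_merge_multiline_comments] at hr
      simp [Pre_merge_multiline_comments, hr] at hp
  · exact ⟨by decide, by decide, by decide⟩
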